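-- pv_equiv track=rewrite | github.com/ghdic/CodingProblemSolving | programmers/등굣길.py | solution
-- ===== SOURCE A (Python) =====
-- def solution(m, n, puddles):
--     MOD = 1_000_000_007
--     map = [[0] * (m + 1) for i in range(n + 1)]
--     map[1][1] = 1
--
--     for x, y in puddles:
--         map[y][x] = -1
--
--     for i in range(1, n + 1):
--         for j in range(1, m + 1):
--             if map[i][j] == -1:
--                 continue
--             if map[i - 1][j] != -1:
--                 map[i][j] += map[i - 1][j]
--             if map[i][j - 1] != -1:
--                 map[i][j] += map[i][j - 1]
--             map[i][j] %= MOD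
--     return map[n][m]
-- ===== SOURCE B (Python) =====
-- def paths(dx, dy):
--     # number of monotone lattice paths taking dx steps one way and dy the other
--     if dx < 0 or dy < 0:
--         return 0
--     r = 1
--     for i in range(1, dx + 1):
--         r = r * (dy + i) // i
--     return r
--
--
-- def solution(m, n, puddles):
--     MOD = 1_000_000_007
--     # mark the blocked cells on the board
--     blocked = [[False] * (m + 1) for _ in range(n + 1)]
--     for x, y in puddles:
--         blocked[y][x] = True
--     pts = [(x, y) for y in range(1, n + 1) for x in range(1, m + 1) if blocked[y][x]]
--     # ways[i] = number of paths from (1,1) to puddle i avoiding all other puddles,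
--     # by inclusion-exclusion over the puddles that come before it
--     ways = []
--     for x, y in pts:
--         w = paths(x - 1, y - 1)
--         for (qx, qy), u in zip(pts, ways):
--             w -= u * paths(x - qx, y - qy)
--         ways.append(w)
--     total = paths(m - 1, n - 1)
--     for (x, y), u in zip(pts, ways):
--         total -= u * paths(m - x, n - y)
--     return total % MOD
-- ===== Notes on version B (the rewrite author's own statement) =====
-- stated objective: alternative
-- what changed: Replaces A's O(m*n) path-counting dynamic programme over the whole grid by combinatorics: the blocked cells are marked on a board, and the answer is assembled from exact binomial path counts combined by inclusion-exclusion over the blocked cells in row-major order, reduced mod 1e9+7 once at the end.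
-- intended difference: When the destination cell (m,n) is itself blocked (given directly or through Python's negative index aliases x=-1/y=-1), A returns its internal sentinel -1, which is never a path count, while B returns the intended count 0. — e.g. on solution(1, 1, [(1, 1)]): A returns -1, B returns 0
import Mathlib
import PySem

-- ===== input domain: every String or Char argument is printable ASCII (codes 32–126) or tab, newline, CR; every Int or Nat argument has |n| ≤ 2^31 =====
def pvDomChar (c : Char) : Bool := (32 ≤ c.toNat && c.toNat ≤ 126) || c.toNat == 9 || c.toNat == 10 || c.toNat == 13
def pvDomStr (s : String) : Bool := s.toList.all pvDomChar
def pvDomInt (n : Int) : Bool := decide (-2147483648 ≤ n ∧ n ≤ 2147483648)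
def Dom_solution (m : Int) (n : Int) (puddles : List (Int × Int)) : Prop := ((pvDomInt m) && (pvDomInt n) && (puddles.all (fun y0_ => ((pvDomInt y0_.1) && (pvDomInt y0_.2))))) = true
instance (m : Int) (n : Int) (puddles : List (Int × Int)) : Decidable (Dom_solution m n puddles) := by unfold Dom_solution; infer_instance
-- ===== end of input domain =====

-- B replaces A's grid dynamic programme by combinatorics: blocked cells are marked on a board
-- and the count is assembled from exact binomial path counts by inclusion-exclusion over the
-- blocked cells, reduced mod 1e9+7 once at the end; equivalence is about the return value.

-- ===== PORT A =====
def solution (m : Int) (n : Int) (puddles : List (Int × Int)) : Int :=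
  let MOD : Int := 1000000007
  let mp : List (List Int) :=
    (PySem.List.pyRange 0 (n + 1) 1).map (fun _ => List.replicate (m + 1).toNat 0)
  let mp := PySem.List.pySetD mp 1 (PySem.List.pySetD (PySem.List.pyGetD mp 1 []) 1 1)
  let mp := puddles.foldl (fun mp p =>
      PySem.List.pySetD mp p.2 (PySem.List.pySetD (PySem.List.pyGetD mp p.2 []) p.1 (-1))) mp
  let mp := (PySem.List.pyRange 1 (n + 1) 1).foldl (fun mp i =>
      (PySem.List.pyRange 1 (m + 1) 1).foldl (fun mp j =>
        if PySem.List.pyGetD (PySem.List.pyGetD mp i []) j 0 = -1 then mp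
        else
          let mp1 :=
            if PySem.List.pyGetD (PySem.List.pyGetD mp (i - 1) []) j 0 ≠ -1 then
              PySem.List.pySetD mp i (PySem.List.pySetD (PySem.List.pyGetD mp i []) j
                (PySem.List.pyGetD (PySem.List.pyGetD mp i []) j 0 +
                 PySem.List.pyGetD (PySem.List.pyGetD mp (i - 1) []) j 0))
            else mp
          let mp2 :=
            if PySem.List.pyGetD (PySem.List.pyGetD mp1 i []) (j - 1) 0 ≠ -1 then
              PySem.List.pySetD mp1 i (PySem.List.pySetD (PySem.List.pyGetD mp1 i []) j
                (PySem.List.pyGetD (PySem.List.pyGetD mp1 i []) j 0 +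
                 PySem.List.pyGetD (PySem.List.pyGetD mp1 i []) (j - 1) 0))
            else mp1
          PySem.List.pySetD mp2 i (PySem.List.pySetD (PySem.List.pyGetD mp2 i []) j
            (PySem.Int.mod (PySem.List.pyGetD (PySem.List.pyGetD mp2 i []) j 0) MOD))) mp) mp
  PySem.List.pyGetD (PySem.List.pyGetD mp n []) m 0

-- ===== PORT B =====
-- Source B helper paths(dx, dy): exact binomial C(dx+dy, dx) by the multiplicative loop
def pyPaths (dx dy : Int) : Int :=
  if dx < 0 ∨ dy < 0 then 0
  else (PySem.List.pyRange 1 (dx + 1) 1).foldl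
    (fun r i => PySem.Int.floordiv (r * (dy + i)) i) 1

-- Source B: blocked = [[False]*(m+1) for _ in range(n+1)]; for x, y in puddles: blocked[y][x] = True
def bBlocked (m : Int) (n : Int) (puddles : List (Int × Int)) : List (List Bool) :=
  puddles.foldl (fun g p =>
      PySem.List.pySetD g p.2 (PySem.List.pySetD (PySem.List.pyGetD g p.2 []) p.1 true))
    ((PySem.List.pyRange 0 (n + 1) 1).map (fun _ => List.replicate (m + 1).toNat false))

-- Source B: pts = [(x, y) for y in range(1, n+1) for x in range(1, m+1) if blocked[y][x]]
def bPts (m : Int) (n : Int) (puddles : List (Int × Int)) : List (Int × Int) :=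
  (PySem.List.pyRange 1 (n + 1) 1).flatMap (fun y =>
    ((PySem.List.pyRange 1 (m + 1) 1).filter (fun x =>
      PySem.List.pyGetD (PySem.List.pyGetD (bBlocked m n puddles) y []) x false)).map
      (fun x => (x, y)))

def solution_alt (m : Int) (n : Int) (puddles : List (Int × Int)) : Int :=
  let pts := bPts m n puddles
  let ways := pts.foldl (fun ways p =>
      ways ++ [(pts.zip ways).foldl
        (fun w qu => w - qu.2 * pyPaths (p.1 - qu.1.1) (p.2 - qu.1.2))
        (pyPaths (p.1 - 1) (p.2 - 1))]) ([] : List Int)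
  PySem.Int.mod ((pts.zip ways).foldl
      (fun t qu => t - qu.2 * pyPaths (m - qu.1.1) (n - qu.1.2))
      (pyPaths (m - 1) (n - 1))) 1000000007

-- ===== PRECONDITION & SPEC =====
-- Pre_ excludes exactly the inputs on which A raises IndexError: grids without a start cell
-- (m < 1 or n < 1) and puddle coordinates outside Python's accepted index range
-- -(m+1)..m × -(n+1)..n.
def Pre_solution (m : Int) (n : Int) (puddles : List (Int × Int)) : Prop :=
  1 ≤ m ∧ 1 ≤ n ∧ ∀ p ∈ puddles, -(m + 1) ≤ p.1 ∧ p.1 ≤ m ∧ -(n + 1) ≤ p.2 ∧ p.2 ≤ n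
instance (m : Int) (n : Int) (puddles : List (Int × Int)) : Decidable (Pre_solution m n puddles) := by unfold Pre_solution; infer_instance
def pvWitness_solution : Int × Int × (List (Int × Int)) := (4, 3, [(2, 2)])

-- When the destination cell (m, n) is itself blocked (given directly, or through Python's
-- negative index aliases x = -1 for column m and y = -1 for row n), A returns its internal
-- sentinel -1 (never a count of paths) while B returns the intended count 0.
def D_solution (m : Int) (n : Int) (puddles : List (Int × Int)) : Prop :=
  ∃ p ∈ puddles, (p.1 = m ∨ p.1 = -1) ∧ (p.2 = n ∨ p.2 = -1)
instance (m : Int) (n : Int) (puddles : List (Int × Int)) : Decidable (D_solution m n puddles) := by unfold D_solution; infer_instance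

def Spec_solution (m : Int) (n : Int) (puddles : List (Int × Int)) (out : Int) : Prop :=
  ¬ D_solution m n puddles → out = solution_alt m n puddles
instance (m : Int) (n : Int) (puddles : List (Int × Int)) (out : Int) : Decidable (Spec_solution m n puddles out) := by unfold Spec_solution; infer_instance

def pvDiffWitness_solution : Int × Int × (List (Int × Int)) := (1, 1, [(1, 1)])
def pvDiffWitnessOut_solution : Int × Int := (-1, 0)

-- ===== CLAIM (what is proved, stated in full; the proofs are below) =====
def Claim_unchanged_solution : Prop := ∀ (m : Int) (n : Int) (puddles : List (Int × Int)), Dom_solution m n puddles → Pre_solution m n puddles → Spec_solution m n puddles (solution m n puddles)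
def Claim_changed_solution : Prop := Dom_solution (pvDiffWitness_solution.1) (pvDiffWitness_solution.2.1) (pvDiffWitness_solution.2.2) ∧ Pre_solution (pvDiffWitness_solution.1) (pvDiffWitness_solution.2.1) (pvDiffWitness_solution.2.2) ∧ D_solution (pvDiffWitness_solution.1) (pvDiffWitness_solution.2.1) (pvDiffWitness_solution.2.2) ∧ solution (pvDiffWitness_solution.1) (pvDiffWitness_solution.2.1) (pvDiffWitness_solution.2.2) = pvDiffWitnessOut_solution.1 ∧ solution_alt (pvDiffWitness_solution.1) (pvDiffWitness_solution.2.1) (pvDiffWitness_solution.2.2) = pvDiffWitnessOut_solution.2 ∧ pvDiffWitnessOut_solution.1 ≠ pvDiffWitnessOut_solution.2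
def Claim_exact_solution : Prop := ∀ (m : Int) (n : Int) (puddles : List (Int × Int)), Dom_solution m n puddles → Pre_solution m n puddles → D_solution m n puddles → solution m n puddles ≠ solution_alt m n puddles

-- ===== LEMMAS AND PROOFS =====

-- the modular DP value of cell (x, y) (x = column, y = row) that both programs compute
def Vc (puddles : List (Int × Int)) : Nat → Nat → Int
  | x, y =>
    if (↑x, ↑y) ∈ puddles then 0
    else if x = 0 ∨ y = 0 then 0
    else if x = 1 ∧ y = 1 then 1
    else PySem.Int.mod (Vc puddles x (y - 1) + Vc puddles (x - 1) y) 1000000007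
  termination_by x y => x + y
  decreasing_by all_goals omega

theorem Vc_nonneg (pud : List (Int × Int)) (x y : Nat) : 0 ≤ Vc pud x y := by
  rw [Vc]
  split_ifs with h1 h2 h3
  · norm_num
  · norm_num
  · norm_num
  · exact PySem.Int.mod_nonneg _ (by norm_num)

theorem Vc_x_zero (pud : List (Int × Int)) (y : Nat) : Vc pud 0 y = 0 := by
  rw [Vc]; split_ifs <;> simp_all

theorem Vc_y_zero (pud : List (Int × Int)) (x : Nat) : Vc pud x 0 = 0 := by
  rw [Vc]; split_ifs <;> simp_all

-- ===== A-side machinery =====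
def tabF (F : Nat → Nat → Int) (M N : Nat) : List (List Int) :=
  (List.range (N + 1)).map (fun i => (List.range (M + 1)).map (fun j => F i j))

theorem tabF_get (F : Nat → Nat → Int) (M N i j : Nat) (hi : i ≤ N) (hj : j ≤ M) :
    PySem.List.pyGetD (PySem.List.pyGetD (tabF F M N) ((i : Nat) : Int) []) ((j : Nat) : Int) 0
    = F i j := by
  rw [PySem.List.pyGetD_natCast, PySem.List.pyGetD_natCast]
  unfold tabF
  have hrow : ((List.range (N + 1)).map
      (fun i => (List.range (M + 1)).map (fun j => F i j))).getD i []
      = (List.range (M + 1)).map (fun j => F i j) := by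
    rw [List.getD_eq_getElem?_getD]
    simp [List.getElem?_range (show i < N + 1 by omega)]
  rw [hrow, List.getD_eq_getElem?_getD]
  simp [List.getElem?_range (show j < M + 1 by omega)]

theorem tabF_set (F : Nat → Nat → Int) (M N i j : Nat) (v : Int) (hi : i ≤ N) (hj : j ≤ M) :
    PySem.List.pySetD (tabF F M N) ((i : Nat) : Int)
      (PySem.List.pySetD (PySem.List.pyGetD (tabF F M N) ((i : Nat) : Int) []) ((j : Nat) : Int) v)
    = tabF (fun a b => if a = i ∧ b = j then v else F a b) M N := by
  rw [PySem.List.pySetD_natCast, PySem.List.pySetD_natCast, PySem.List.pyGetD_natCast]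
  unfold tabF
  apply List.ext_getElem
  · simp
  intro a ha _
  simp only [List.length_set, List.length_map, List.length_range] at ha
  rw [List.getElem_set]
  simp only [List.getElem_map, List.getElem_range]
  by_cases hai : i = a
  · subst hai
    rw [if_pos rfl]
    rw [List.getD_eq_getElem?_getD]
    simp only [List.getElem?_map, List.getElem?_range (by omega : i < N + 1),
      Option.map_some, Option.getD_some]
    apply List.ext_getElem
    · simp
    intro b hb _
    simp only [List.length_set, List.length_map, List.length_range] at hb
    rw [List.getElem_set]
    simp only [List.getElem_map, List.getElem_range]
    by_cases hbj : j = b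
    · subst hbj
      simp
    · rw [if_neg hbj, if_neg (by tauto)]
  · rw [if_neg hai]
    apply List.map_congr_left
    intro b hb
    rw [if_neg (by tauto)]

theorem tabF_congr (F G : Nat → Nat → Int) (M N : Nat)
    (h : ∀ i ≤ N, ∀ j ≤ M, F i j = G i j) : tabF F M N = tabF G M N := by
  unfold tabF
  apply List.map_congr_left
  intro i hi
  apply List.map_congr_left
  intro j hj
  exact h i (by simpa using Nat.lt_succ_iff.mp (List.mem_range.mp hi))
    j (by simpa using Nat.lt_succ_iff.mp (List.mem_range.mp hj))

-- the initial cell values (after the start-cell and puddle writes), and the processed values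
def cellI (pud : List (Int × Int)) (i j : Nat) : Int :=
  if ((↑j : Int), (↑i : Int)) ∈ pud then -1 else if i = 1 ∧ j = 1 then 1 else 0

def cellP (pud : List (Int × Int)) (i j : Nat) : Int :=
  if ((↑j : Int), (↑i : Int)) ∈ pud then -1 else Vc pud j i

theorem cellP_boundary (pud : List (Int × Int)) (i j : Nat) (h : i = 0 ∨ j = 0) :
    cellP pud i j = cellI pud i j := by
  unfold cellP cellI
  split_ifs with h1 h2
  · rfl
  · omega
  · rcases h with h | h <;> subst h
    · exact Vc_y_zero pud j
    · exact Vc_x_zero pud i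

-- table contents after s fully processed rows / after row r processed through column t
def FS (pud : List (Int × Int)) (s i j : Nat) : Int :=
  if 1 ≤ i ∧ i ≤ s then cellP pud i j else cellI pud i j

def FR (pud : List (Int × Int)) (r t i j : Nat) : Int :=
  if 1 ≤ i ∧ (i < r ∨ (i = r ∧ 1 ≤ j ∧ j ≤ t)) then cellP pud i j else cellI pud i j

theorem initA (M N : Nat) :
    (PySem.List.pyRange 0 ((↑N : Int) + 1) 1).map (fun _ => List.replicate (M + 1) (0 : Int))
    = tabF (fun _ _ => (0 : Int)) M N := by
  unfold tabF
  rw [PySem.List.pyRange_one]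
  rw [show (((↑N : Int) + 1) - 0).toNat = N + 1 from by omega]
  rw [List.map_map]
  apply List.map_congr_left
  intro k hk
  simp [List.map_const']

theorem startA (M N : Nat) (hM : 1 ≤ M) (hN : 1 ≤ N) :
    PySem.List.pySetD (tabF (fun _ _ => (0 : Int)) M N) (((1 : Nat) : Int))
      (PySem.List.pySetD
        (PySem.List.pyGetD (tabF (fun _ _ => (0 : Int)) M N) (((1 : Nat) : Int)) [])
        (((1 : Nat) : Int)) 1)
    = tabF (fun i j => if i = 1 ∧ j = 1 then (1 : Int) else 0) M N :=
  tabF_set _ M N 1 1 1 hN hM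

theorem pyGetD_wrap {α : Type} (xs : List α) (L : Int) (hL : (xs.length : Int) = L)
    (i : Int) (d : α) (h1 : -L ≤ i) (h2 : i < L) :
    PySem.List.pyGetD xs i d
    = PySem.List.pyGetD xs ((((PySem.Int.mod i L).toNat : Nat) : Int)) d := by
  subst hL
  by_cases h0 : 0 ≤ i
  · have hmod : PySem.Int.mod i (xs.length : Int) = i := by
      rw [PySem.Int.mod_eq_emod_of_pos (by omega), Int.emod_eq_of_lt h0 h2]
    rw [hmod]
    congr 1
    omega
  · have hmod : PySem.Int.mod i (xs.length : Int) = i + (xs.length : Int) := by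
      rw [PySem.Int.mod_eq_emod_of_pos (by omega)]
      have h3 := Int.add_mul_emod_self_left (a := i) (b := (xs.length : Int)) (c := 1)
      rw [mul_one] at h3
      rw [← h3, Int.emod_eq_of_lt (by omega) (by omega)]
    rw [hmod, PySem.List.pyGetD_natCast]
    have hk : i = -(((-i).toNat : Nat) : Int) := by omega
    rw [hk, PySem.List.pyGetD_neg_natCast _ _ _ (by omega) (by omega)]
    rw [List.getD_eq_getElem?_getD]
    rw [List.getElem?_eq_getElem
      (show (-(((-i).toNat : Nat) : Int) + (xs.length : Int)).toNat < xs.length from by omega)]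
    rw [Option.getD_some]
    congr 1
    omega

theorem pySetD_wrap {α : Type} (xs : List α) (L : Int) (hL : (xs.length : Int) = L)
    (i : Int) (v : α) (h1 : -L ≤ i) (h2 : i < L) :
    PySem.List.pySetD xs i v
    = PySem.List.pySetD xs ((((PySem.Int.mod i L).toNat : Nat) : Int)) v := by
  subst hL
  unfold PySem.List.pySetD PySem.List.pySet?
  have hidx : PySem.List.pyIdx? xs.length i
      = PySem.List.pyIdx? xs.length ((((PySem.Int.mod i (xs.length : Int)).toNat : Nat) : Int)) := by
    have hmod : PySem.Int.mod i (xs.length : Int)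
        = if 0 ≤ i then i else i + (xs.length : Int) := by
      split_ifs with h0
      · rw [PySem.Int.mod_eq_emod_of_pos (by omega), Int.emod_eq_of_lt h0 h2]
      · rw [PySem.Int.mod_eq_emod_of_pos (by omega)]
        have h3 := Int.add_mul_emod_self_left (a := i) (b := (xs.length : Int)) (c := 1)
        rw [mul_one] at h3
        rw [← h3, Int.emod_eq_of_lt (by omega) (by omega)]
    rw [hmod]
    unfold PySem.List.pyIdx?
    split_ifs <;> first | rfl | omega | (congr 1; omega)
  rw [hidx]

theorem tabF_row (F : Nat → Nat → Int) (M N i : Nat) (hi : i ≤ N) :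
    PySem.List.pyGetD (tabF F M N) ((i : Nat) : Int) []
    = (List.range (M + 1)).map (fun j => F i j) := by
  rw [PySem.List.pyGetD_natCast]
  unfold tabF
  rw [List.getD_eq_getElem?_getD]
  simp [List.getElem?_range (show i < N + 1 by omega)]

theorem puddleA (M N : Nat) :
    ∀ (l : List (Int × Int)) (B : Nat → Nat → Int),
    (∀ p ∈ l, -((↑M : Int) + 1) ≤ p.1 ∧ p.1 ≤ ↑M ∧ -((↑N : Int) + 1) ≤ p.2 ∧ p.2 ≤ ↑N) →
    l.foldl (fun mp p =>
        PySem.List.pySetD mp p.2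
          (PySem.List.pySetD (PySem.List.pyGetD mp p.2 []) p.1 (-1))) (tabF B M N)
    = tabF (fun i j => if ((↑j : Int), (↑i : Int)) ∈
          l.map (fun p => (PySem.Int.mod p.1 ((↑M : Int) + 1), PySem.Int.mod p.2 ((↑N : Int) + 1)))
        then -1 else B i j) M N := by
  intro l
  induction l with
  | nil =>
    intro B h
    rw [List.foldl_nil]
    exact tabF_congr _ _ _ _ (fun i _ j _ => by simp)
  | cons p l ih =>
    obtain ⟨x, y⟩ := p
    intro B h
    have hb := h (x, y) List.mem_cons_self
    simp only at hb
    obtain ⟨hb1, hb2, hb3, hb4⟩ := hb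
    have hmy0 : 0 ≤ PySem.Int.mod y ((↑N : Int) + 1) := PySem.Int.mod_nonneg _ (by omega)
    have hmy1 : PySem.Int.mod y ((↑N : Int) + 1) < (↑N : Int) + 1 := PySem.Int.mod_lt _ (by omega)
    have hmx0 : 0 ≤ PySem.Int.mod x ((↑M : Int) + 1) := PySem.Int.mod_nonneg _ (by omega)
    have hmx1 : PySem.Int.mod x ((↑M : Int) + 1) < (↑M : Int) + 1 := PySem.Int.mod_lt _ (by omega)
    rw [List.foldl_cons]
    rw [show ((x, y).2 : Int) = y from rfl, show ((x, y).1 : Int) = x from rfl]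
    rw [pyGetD_wrap (tabF B M N) ((↑N : Int) + 1) (by simp [tabF]) y []
        (by omega) (by omega)]
    rw [pySetD_wrap (PySem.List.pyGetD (tabF B M N)
          ((((PySem.Int.mod y ((↑N : Int) + 1)).toNat : Nat) : Int)) [])
        ((↑M : Int) + 1)
        (by rw [tabF_row _ _ _ _ (show (PySem.Int.mod y ((↑N : Int) + 1)).toNat ≤ N by omega)]
            simp)
        x (-1) (by omega) (by omega)]
    rw [pySetD_wrap (tabF B M N) ((↑N : Int) + 1) (by simp [tabF]) y _
        (by omega) (by omega)]
    rw [tabF_set _ _ _ _ _ _ (by omega) (by omega)]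
    rw [ih _ (fun q hq => h q (List.mem_cons_of_mem _ hq))]
    apply tabF_congr
    intro i hi j hj
    by_cases hm : ((↑j : Int), (↑i : Int)) ∈
        l.map (fun p => (PySem.Int.mod p.1 ((↑M : Int) + 1), PySem.Int.mod p.2 ((↑N : Int) + 1)))
    · simp only [List.map_cons, List.mem_cons]
      rw [if_pos hm, if_pos (Or.inr hm)]
    · rw [if_neg hm]
      simp only [List.map_cons, List.mem_cons]
      by_cases h2 : i = (PySem.Int.mod y ((↑N : Int) + 1)).toNat ∧
          j = (PySem.Int.mod x ((↑M : Int) + 1)).toNat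
      · rw [if_pos h2, if_pos (Or.inl (by rw [Prod.mk.injEq]; constructor <;> omega))]
      · rw [if_neg h2, if_neg (by
          push_neg
          refine ⟨?_, hm⟩
          intro hc
          rw [Prod.mk.injEq] at hc
          omega)]

def tabB (F : Nat → Nat → Bool) (M N : Nat) : List (List Bool) :=
  (List.range (N + 1)).map (fun i => (List.range (M + 1)).map (fun j => F i j))

theorem tabB_get (F : Nat → Nat → Bool) (M N i j : Nat) (hi : i ≤ N) (hj : j ≤ M) :
    PySem.List.pyGetD (PySem.List.pyGetD (tabB F M N) ((i : Nat) : Int) []) ((j : Nat) : Int) false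
    = F i j := by
  rw [PySem.List.pyGetD_natCast, PySem.List.pyGetD_natCast]
  unfold tabB
  have hrow : ((List.range (N + 1)).map
      (fun i => (List.range (M + 1)).map (fun j => F i j))).getD i []
      = (List.range (M + 1)).map (fun j => F i j) := by
    rw [List.getD_eq_getElem?_getD]
    simp [List.getElem?_range (show i < N + 1 by omega)]
  rw [hrow, List.getD_eq_getElem?_getD]
  simp [List.getElem?_range (show j < M + 1 by omega)]

theorem tabB_set (F : Nat → Nat → Bool) (M N i j : Nat) (v : Bool) (hi : i ≤ N) (hj : j ≤ M) :
    PySem.List.pySetD (tabB F M N) ((i : Nat) : Int)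
      (PySem.List.pySetD (PySem.List.pyGetD (tabB F M N) ((i : Nat) : Int) []) ((j : Nat) : Int) v)
    = tabB (fun a b => if a = i ∧ b = j then v else F a b) M N := by
  rw [PySem.List.pySetD_natCast, PySem.List.pySetD_natCast, PySem.List.pyGetD_natCast]
  unfold tabB
  apply List.ext_getElem
  · simp
  intro a ha _
  simp only [List.length_set, List.length_map, List.length_range] at ha
  rw [List.getElem_set]
  simp only [List.getElem_map, List.getElem_range]
  by_cases hai : i = a
  · subst hai
    rw [if_pos rfl]
    rw [List.getD_eq_getElem?_getD]
    simp only [List.getElem?_map, List.getElem?_range (by omega : i < N + 1),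
      Option.map_some, Option.getD_some]
    apply List.ext_getElem
    · simp
    intro b hb _
    simp only [List.length_set, List.length_map, List.length_range] at hb
    rw [List.getElem_set]
    simp only [List.getElem_map, List.getElem_range]
    by_cases hbj : j = b
    · subst hbj
      simp
    · rw [if_neg hbj, if_neg (by tauto)]
  · rw [if_neg hai]
    apply List.map_congr_left
    intro b hb
    rw [if_neg (by tauto)]

theorem tabB_congr (F G : Nat → Nat → Bool) (M N : Nat)
    (h : ∀ i ≤ N, ∀ j ≤ M, F i j = G i j) : tabB F M N = tabB G M N := by
  unfold tabB
  apply List.map_congr_left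
  intro i hi
  apply List.map_congr_left
  intro j hj
  exact h i (by simpa using Nat.lt_succ_iff.mp (List.mem_range.mp hi))
    j (by simpa using Nat.lt_succ_iff.mp (List.mem_range.mp hj))

theorem tabB_row (F : Nat → Nat → Bool) (M N i : Nat) (hi : i ≤ N) :
    PySem.List.pyGetD (tabB F M N) ((i : Nat) : Int) []
    = (List.range (M + 1)).map (fun j => F i j) := by
  rw [PySem.List.pyGetD_natCast]
  unfold tabB
  rw [List.getD_eq_getElem?_getD]
  simp [List.getElem?_range (show i < N + 1 by omega)]

theorem initB (M N : Nat) :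
    (PySem.List.pyRange 0 ((↑N : Int) + 1) 1).map (fun _ => List.replicate (M + 1) false)
    = tabB (fun _ _ => false) M N := by
  unfold tabB
  rw [PySem.List.pyRange_one]
  rw [show (((↑N : Int) + 1) - 0).toNat = N + 1 from by omega]
  rw [List.map_map]
  apply List.map_congr_left
  intro k hk
  simp [List.map_const']

theorem puddleB (M N : Nat) :
    ∀ (l : List (Int × Int)) (B : Nat → Nat → Bool),
    (∀ p ∈ l, -((↑M : Int) + 1) ≤ p.1 ∧ p.1 ≤ ↑M ∧ -((↑N : Int) + 1) ≤ p.2 ∧ p.2 ≤ ↑N) →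
    l.foldl (fun g p =>
        PySem.List.pySetD g p.2
          (PySem.List.pySetD (PySem.List.pyGetD g p.2 []) p.1 true)) (tabB B M N)
    = tabB (fun i j => if ((↑j : Int), (↑i : Int)) ∈
          l.map (fun p => (PySem.Int.mod p.1 ((↑M : Int) + 1), PySem.Int.mod p.2 ((↑N : Int) + 1)))
        then true else B i j) M N := by
  intro l
  induction l with
  | nil =>
    intro B h
    rw [List.foldl_nil]
    exact tabB_congr _ _ _ _ (fun i _ j _ => by simp)
  | cons p l ih =>
    obtain ⟨x, y⟩ := p
    intro B h
    have hb := h (x, y) List.mem_cons_self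
    simp only at hb
    obtain ⟨hb1, hb2, hb3, hb4⟩ := hb
    have hmy0 : 0 ≤ PySem.Int.mod y ((↑N : Int) + 1) := PySem.Int.mod_nonneg _ (by omega)
    have hmy1 : PySem.Int.mod y ((↑N : Int) + 1) < (↑N : Int) + 1 := PySem.Int.mod_lt _ (by omega)
    have hmx0 : 0 ≤ PySem.Int.mod x ((↑M : Int) + 1) := PySem.Int.mod_nonneg _ (by omega)
    have hmx1 : PySem.Int.mod x ((↑M : Int) + 1) < (↑M : Int) + 1 := PySem.Int.mod_lt _ (by omega)
    rw [List.foldl_cons]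
    rw [show ((x, y).2 : Int) = y from rfl, show ((x, y).1 : Int) = x from rfl]
    rw [pyGetD_wrap (tabB B M N) ((↑N : Int) + 1) (by simp [tabB]) y []
        (by omega) (by omega)]
    rw [pySetD_wrap (PySem.List.pyGetD (tabB B M N)
          ((((PySem.Int.mod y ((↑N : Int) + 1)).toNat : Nat) : Int)) [])
        ((↑M : Int) + 1)
        (by rw [tabB_row _ _ _ _ (show (PySem.Int.mod y ((↑N : Int) + 1)).toNat ≤ N by omega)]
            simp)
        x true (by omega) (by omega)]
    rw [pySetD_wrap (tabB B M N) ((↑N : Int) + 1) (by simp [tabB]) y _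
        (by omega) (by omega)]
    rw [tabB_set _ _ _ _ _ _ (by omega) (by omega)]
    rw [ih _ (fun q hq => h q (List.mem_cons_of_mem _ hq))]
    apply tabB_congr
    intro i hi j hj
    by_cases hm : ((↑j : Int), (↑i : Int)) ∈
        l.map (fun p => (PySem.Int.mod p.1 ((↑M : Int) + 1), PySem.Int.mod p.2 ((↑N : Int) + 1)))
    · simp only [List.map_cons, List.mem_cons]
      rw [if_pos hm, if_pos (Or.inr hm)]
    · rw [if_neg hm]
      simp only [List.map_cons, List.mem_cons]
      by_cases h2 : i = (PySem.Int.mod y ((↑N : Int) + 1)).toNat ∧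
          j = (PySem.Int.mod x ((↑M : Int) + 1)).toNat
      · rw [if_pos h2, if_pos (Or.inl (by rw [Prod.mk.injEq]; constructor <;> omega))]
      · rw [if_neg h2, if_neg (by
          push_neg
          refine ⟨?_, hm⟩
          intro hc
          rw [Prod.mk.injEq] at hc
          omega)]

theorem Vc_of_mem (pud : List (Int × Int)) (x y : Nat) (h : ((↑x : Int), (↑y : Int)) ∈ pud) :
    Vc pud x y = 0 := by
  rw [Vc, if_pos h]

theorem cellI_ne (pud : List (Int × Int)) (i j : Nat) (h : ((↑j : Int), (↑i : Int)) ∉ pud) :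
    cellI pud i j ≠ -1 := by
  unfold cellI; rw [if_neg h]; split_ifs <;> norm_num

theorem cellI_of_mem (pud : List (Int × Int)) (i j : Nat) (h : ((↑j : Int), (↑i : Int)) ∈ pud) :
    cellI pud i j = -1 := by
  unfold cellI; rw [if_pos h]

theorem cellP_of_mem (pud : List (Int × Int)) (i j : Nat) (h : ((↑j : Int), (↑i : Int)) ∈ pud) :
    cellP pud i j = -1 := by
  unfold cellP; rw [if_pos h]

theorem cellP_of_not_mem (pud : List (Int × Int)) (i j : Nat) (h : ((↑j : Int), (↑i : Int)) ∉ pud) :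
    cellP pud i j = Vc pud j i := by
  unfold cellP; rw [if_neg h]

theorem cellP_ne_iff (pud : List (Int × Int)) (i j : Nat) :
    cellP pud i j ≠ -1 ↔ ((↑j : Int), (↑i : Int)) ∉ pud := by
  unfold cellP
  split_ifs with h <;> simp [h]
  have := Vc_nonneg pud j i
  omega

theorem FR_up (pud : List (Int × Int)) (r t j : Nat) (hr : 1 ≤ r) :
    FR pud r t (r - 1) j = cellP pud (r - 1) j := by
  unfold FR
  by_cases h : 1 ≤ r - 1
  · rw [if_pos ⟨h, Or.inl (by omega)⟩]
  · rw [if_neg (by omega)]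
    exact (cellP_boundary _ _ _ (Or.inl (by omega))).symm

theorem FR_left (pud : List (Int × Int)) (r t : Nat) (hr : 1 ≤ r) :
    FR pud r t r t = cellP pud r t := by
  unfold FR
  by_cases h : 1 ≤ t
  · rw [if_pos ⟨hr, Or.inr ⟨rfl, h, le_rfl⟩⟩]
  · rw [if_neg (by omega)]
    exact (cellP_boundary _ _ _ (Or.inr (by omega))).symm

theorem FR_cur (pud : List (Int × Int)) (r t : Nat) : FR pud r t r (t + 1) = cellI pud r (t + 1) := by
  unfold FR
  rw [if_neg (by omega)]

theorem innerA (pud : List (Int × Int)) (M N r : Nat) (hr1 : 1 ≤ r) (hrN : r ≤ N)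
    (ri : Int) (hri : ri = ↑r) :
    ∀ t, t ≤ M →
    (PySem.List.pyRange (↑t + 1) (↑M + 1) 1).foldl
      (fun mp j =>
        if PySem.List.pyGetD (PySem.List.pyGetD mp ri []) j 0 = -1 then mp
        else
          let mp1 :=
            if PySem.List.pyGetD (PySem.List.pyGetD mp (ri - 1) []) j 0 ≠ -1 then
              PySem.List.pySetD mp ri (PySem.List.pySetD (PySem.List.pyGetD mp ri []) j
                (PySem.List.pyGetD (PySem.List.pyGetD mp ri []) j 0 +
                 PySem.List.pyGetD (PySem.List.pyGetD mp (ri - 1) []) j 0))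
            else mp
          let mp2 :=
            if PySem.List.pyGetD (PySem.List.pyGetD mp1 ri []) (j - 1) 0 ≠ -1 then
              PySem.List.pySetD mp1 ri (PySem.List.pySetD (PySem.List.pyGetD mp1 ri []) j
                (PySem.List.pyGetD (PySem.List.pyGetD mp1 ri []) j 0 +
                 PySem.List.pyGetD (PySem.List.pyGetD mp1 ri []) (j - 1) 0))
            else mp1
          PySem.List.pySetD mp2 ri (PySem.List.pySetD (PySem.List.pyGetD mp2 ri []) j
            (PySem.Int.mod (PySem.List.pyGetD (PySem.List.pyGetD mp2 ri []) j 0) 1000000007)))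
      (tabF (FR pud r t) M N)
    = tabF (FR pud r M) M N := by
  subst hri
  intro t ht
  induction hk : M - t generalizing t with
  | zero =>
    have : t = M := by omega
    subst this
    rw [PySem.List.pyRange_one_eq_nil (a := (↑t : Int) + 1) (b := (↑t : Int) + 1) le_rfl]
    rfl
  | succ k ih =>
    have htM : t < M := by omega
    rw [PySem.List.pyRange_one_cons (a := (↑t : Int) + 1) (b := (↑M : Int) + 1) (by push_cast; omega),
        List.foldl_cons]
    have hj1 : ((↑t : Int) + 1) = ((↑(t + 1) : Nat) : Int) := by push_cast; ring
    have hcur : PySem.List.pyGetD (PySem.List.pyGetD (tabF (FR pud r t) M N) (↑r : Int) []) ((↑(t + 1) : Nat) : Int) 0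
        = cellI pud r (t + 1) := by
      rw [tabF_get _ _ _ _ _ hrN (by omega), FR_cur]
    have hstep :
        (fun mp j =>
          if PySem.List.pyGetD (PySem.List.pyGetD mp (↑r : Int) []) j 0 = -1 then mp
          else
            let mp1 :=
              if PySem.List.pyGetD (PySem.List.pyGetD mp ((↑r : Int) - 1) []) j 0 ≠ -1 then
                PySem.List.pySetD mp (↑r : Int) (PySem.List.pySetD (PySem.List.pyGetD mp (↑r : Int) []) j
                  (PySem.List.pyGetD (PySem.List.pyGetD mp (↑r : Int) []) j 0 +
                   PySem.List.pyGetD (PySem.List.pyGetD mp ((↑r : Int) - 1) []) j 0))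
              else mp
            let mp2 :=
              if PySem.List.pyGetD (PySem.List.pyGetD mp1 (↑r : Int) []) (j - 1) 0 ≠ -1 then
                PySem.List.pySetD mp1 (↑r : Int) (PySem.List.pySetD (PySem.List.pyGetD mp1 (↑r : Int) []) j
                  (PySem.List.pyGetD (PySem.List.pyGetD mp1 (↑r : Int) []) j 0 +
                   PySem.List.pyGetD (PySem.List.pyGetD mp1 (↑r : Int) []) (j - 1) 0))
              else mp1
            PySem.List.pySetD mp2 (↑r : Int) (PySem.List.pySetD (PySem.List.pyGetD mp2 (↑r : Int) []) j
              (PySem.Int.mod (PySem.List.pyGetD (PySem.List.pyGetD mp2 (↑r : Int) []) j 0) 1000000007)))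
          (tabF (FR pud r t) M N) ((↑t : Int) + 1)
        = tabF (FR pud r (t + 1)) M N := by
      simp only []
      rw [hj1, hcur]
      by_cases hb : (((↑(t + 1) : Nat) : Int), ((↑r : Nat) : Int)) ∈ pud
      · rw [if_pos (cellI_of_mem pud r (t + 1) hb)]
        apply tabF_congr
        intro i hi j hj
        unfold FR
        by_cases hij : i = r ∧ j = t + 1
        · obtain ⟨rfl, rfl⟩ := hij
          rw [if_neg (by omega), if_pos (by omega)]
          rw [cellP_of_mem _ _ _ hb, cellI_of_mem _ _ _ hb]
        · exact if_congr (by omega) rfl rfl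
      · rw [if_neg (cellI_ne pud r (t + 1) hb)]
        rw [show ((↑r : Int) - 1) = ((↑(r - 1) : Nat) : Int) from by omega]
        have hup : PySem.List.pyGetD (PySem.List.pyGetD (tabF (FR pud r t) M N)
            ((↑(r - 1) : Nat) : Int) []) ((↑(t + 1) : Nat) : Int) 0 = cellP pud (r - 1) (t + 1) := by
          rw [tabF_get _ _ _ (r - 1) (t + 1) (by omega) (by omega), FR_up _ _ _ _ hr1]
        simp only [hup]
        have hT1 : (if cellP pud (r - 1) (t + 1) ≠ -1 then
              PySem.List.pySetD (tabF (FR pud r t) M N) (↑r : Int)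
                (PySem.List.pySetD (PySem.List.pyGetD (tabF (FR pud r t) M N) (↑r : Int) []) ((↑(t + 1) : Nat) : Int)
                  (cellI pud r (t + 1) + cellP pud (r - 1) (t + 1)))
            else tabF (FR pud r t) M N)
            = tabF (fun a b => if a = r ∧ b = t + 1 then
                cellI pud r (t + 1) + Vc pud (t + 1) (r - 1) else FR pud r t a b) M N := by
          by_cases hub : (((↑(t + 1) : Nat) : Int), ((↑(r - 1) : Nat) : Int)) ∈ pud
          · rw [if_neg (by rw [cellP_of_mem _ _ _ hub]; simp)]
            apply tabF_congr
            intro a ha b hbb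
            by_cases hab : a = r ∧ b = t + 1
            · obtain ⟨rfl, rfl⟩ := hab
              rw [if_pos ⟨rfl, rfl⟩, FR_cur, Vc_of_mem _ _ _ hub]
              ring
            · rw [if_neg hab]
          · rw [if_pos ((cellP_ne_iff _ _ _).mpr hub), cellP_of_not_mem _ _ _ hub]
            exact tabF_set _ _ _ _ _ _ hrN (by omega)
        rw [hT1]
        have hleft : PySem.List.pyGetD (PySem.List.pyGetD
              (tabF (fun a b => if a = r ∧ b = t + 1 then
                cellI pud r (t + 1) + Vc pud (t + 1) (r - 1) else FR pud r t a b) M N) (↑r : Int) [])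
              (((↑(t + 1) : Nat) : Int) - 1) 0 = cellP pud r t := by
          rw [show (((↑(t + 1) : Nat) : Int) - 1) = ((↑t : Nat) : Int) from by omega]
          rw [tabF_get _ _ _ r t hrN (by omega)]
          rw [if_neg (by omega), FR_left _ _ _ hr1]
        have hcur1 : PySem.List.pyGetD (PySem.List.pyGetD
              (tabF (fun a b => if a = r ∧ b = t + 1 then
                cellI pud r (t + 1) + Vc pud (t + 1) (r - 1) else FR pud r t a b) M N) (↑r : Int) [])
              ((↑(t + 1) : Nat) : Int) 0 = cellI pud r (t + 1) + Vc pud (t + 1) (r - 1) := by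
          rw [tabF_get _ _ _ r (t + 1) hrN (by omega)]
          rw [if_pos ⟨rfl, rfl⟩]
        simp only [hleft, hcur1]
        have hT2 : (if cellP pud r t ≠ -1 then
              PySem.List.pySetD
                (tabF (fun a b => if a = r ∧ b = t + 1 then
                  cellI pud r (t + 1) + Vc pud (t + 1) (r - 1) else FR pud r t a b) M N) (↑r : Int)
                (PySem.List.pySetD (PySem.List.pyGetD
                  (tabF (fun a b => if a = r ∧ b = t + 1 then
                    cellI pud r (t + 1) + Vc pud (t + 1) (r - 1) else FR pud r t a b) M N) (↑r : Int) [])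
                  ((↑(t + 1) : Nat) : Int)
                  (cellI pud r (t + 1) + Vc pud (t + 1) (r - 1) + cellP pud r t))
            else tabF (fun a b => if a = r ∧ b = t + 1 then
              cellI pud r (t + 1) + Vc pud (t + 1) (r - 1) else FR pud r t a b) M N)
            = tabF (fun a b => if a = r ∧ b = t + 1 then
                cellI pud r (t + 1) + Vc pud (t + 1) (r - 1) + Vc pud t r else FR pud r t a b) M N := by
          by_cases hlb : (((↑t : Nat) : Int), ((↑r : Nat) : Int)) ∈ pud
          · rw [if_neg (by rw [cellP_of_mem _ _ _ hlb]; simp)]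
            apply tabF_congr
            intro a ha b hbb
            by_cases hab : a = r ∧ b = t + 1
            · obtain ⟨rfl, rfl⟩ := hab
              rw [if_pos ⟨rfl, rfl⟩, if_pos ⟨rfl, rfl⟩, Vc_of_mem _ _ _ hlb]
              ring
            · rw [if_neg hab, if_neg hab]
          · rw [if_pos ((cellP_ne_iff _ _ _).mpr hlb), cellP_of_not_mem _ _ _ hlb]
            rw [tabF_set _ _ _ _ _ _ hrN (by omega)]
            apply tabF_congr
            intro a ha b hbb
            by_cases hab : a = r ∧ b = t + 1
            · obtain ⟨rfl, rfl⟩ := hab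
              rw [if_pos ⟨rfl, rfl⟩, if_pos ⟨rfl, rfl⟩]
            · rw [if_neg hab, if_neg hab, if_neg hab]
        rw [hT2]
        have hcur2 : PySem.List.pyGetD (PySem.List.pyGetD
              (tabF (fun a b => if a = r ∧ b = t + 1 then
                cellI pud r (t + 1) + Vc pud (t + 1) (r - 1) + Vc pud t r else FR pud r t a b) M N) (↑r : Int) [])
              ((↑(t + 1) : Nat) : Int) 0
            = cellI pud r (t + 1) + Vc pud (t + 1) (r - 1) + Vc pud t r := by
          rw [tabF_get _ _ _ r (t + 1) hrN (by omega)]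
          rw [if_pos ⟨rfl, rfl⟩]
        simp only [hcur2]
        rw [tabF_set _ _ _ _ _ _ hrN (by omega)]
        apply tabF_congr
        intro a ha b hbb
        by_cases hab : a = r ∧ b = t + 1
        · rw [if_pos hab, hab.1, hab.2]
          unfold FR
          rw [if_pos (by omega), cellP_of_not_mem _ _ _ hb]
          by_cases h11 : t + 1 = 1 ∧ r = 1
          · obtain ⟨ht0, hr0⟩ := h11
            have ht0' : t = 0 := by omega
            subst ht0'; subst hr0
            rw [Vc_y_zero, Vc_x_zero]
            rw [show cellI pud 1 1 = 1 from by unfold cellI; rw [if_neg hb, if_pos ⟨rfl, rfl⟩]]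
            rw [show Vc pud 1 1 = 1 from by
              rw [Vc, if_neg hb, if_neg (by omega), if_pos ⟨rfl, rfl⟩]]
            rw [PySem.Int.mod_eq_emod_of_pos (by norm_num)]
            norm_num
          · conv_rhs => rw [Vc]
            rw [if_neg hb, if_neg (by omega), if_neg (by omega)]
            rw [show cellI pud r (t + 1) = 0 from by
              unfold cellI; rw [if_neg hb, if_neg (by omega)]]
            rw [show (t + 1) - 1 = t from by omega]
            congr 1
            ring
        · rw [if_neg hab, if_neg hab]
          unfold FR
          exact if_congr (by omega) rfl rfl
    have h2 := ih (t + 1) (by omega) (by omega)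
    rw [show ((↑(t + 1) : Nat) : Int) + 1 = (↑t + 1 + 1 : Int) from by push_cast; ring] at h2
    rw [← h2]
    congr 1

theorem FS0_FR (pud : List (Int × Int)) (M N s : Nat) :
    tabF (FS pud s) M N = tabF (FR pud (s + 1) 0) M N := by
  apply tabF_congr
  intro i _ j _
  unfold FS FR
  exact if_congr (by omega) rfl rfl

theorem FRM_FS (pud : List (Int × Int)) (M N s : Nat) :
    tabF (FR pud (s + 1) M) M N = tabF (FS pud (s + 1)) M N := by
  apply tabF_congr
  intro i _ j _
  unfold FS FR
  by_cases hj : 1 ≤ j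
  · exact if_congr (by omega) rfl rfl
  · have hj0 : j = 0 := by omega
    subst hj0
    by_cases hi : 1 ≤ i ∧ i = s + 1
    · rw [if_neg (by omega), if_pos (by omega)]
      exact (cellP_boundary _ _ _ (Or.inr rfl)).symm
    · exact if_congr (by omega) rfl rfl

theorem outerA (pud : List (Int × Int)) (M N : Nat) :
    ∀ s, s ≤ N →
    (PySem.List.pyRange (↑s + 1) (↑N + 1) 1).foldl
      (fun mp i =>
        (PySem.List.pyRange 1 (↑M + 1) 1).foldl
          (fun mp j =>
            if PySem.List.pyGetD (PySem.List.pyGetD mp i []) j 0 = -1 then mp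
            else
              let mp1 :=
                if PySem.List.pyGetD (PySem.List.pyGetD mp (i - 1) []) j 0 ≠ -1 then
                  PySem.List.pySetD mp i (PySem.List.pySetD (PySem.List.pyGetD mp i []) j
                    (PySem.List.pyGetD (PySem.List.pyGetD mp i []) j 0 +
                     PySem.List.pyGetD (PySem.List.pyGetD mp (i - 1) []) j 0))
                else mp
              let mp2 :=
                if PySem.List.pyGetD (PySem.List.pyGetD mp1 i []) (j - 1) 0 ≠ -1 then
                  PySem.List.pySetD mp1 i (PySem.List.pySetD (PySem.List.pyGetD mp1 i []) j
                    (PySem.List.pyGetD (PySem.List.pyGetD mp1 i []) j 0 +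
                     PySem.List.pyGetD (PySem.List.pyGetD mp1 i []) (j - 1) 0))
                else mp1
              PySem.List.pySetD mp2 i (PySem.List.pySetD (PySem.List.pyGetD mp2 i []) j
                (PySem.Int.mod (PySem.List.pyGetD (PySem.List.pyGetD mp2 i []) j 0) 1000000007)))
          mp)
      (tabF (FS pud s) M N)
    = tabF (FS pud N) M N := by
  intro s hs
  induction hk : N - s generalizing s with
  | zero =>
    have : s = N := by omega
    subst this
    rw [PySem.List.pyRange_one_eq_nil (a := (↑s : Int) + 1) (b := (↑s : Int) + 1) le_rfl]
    rfl
  | succ k ih =>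
    have hsN : s < N := by omega
    rw [PySem.List.pyRange_one_cons (a := (↑s : Int) + 1) (b := (↑N : Int) + 1) (by push_cast; omega),
        List.foldl_cons]
    have hinner := innerA pud M N (s + 1) (by omega) (by omega) ((↑s : Int) + 1) (by push_cast; ring)
      0 (by omega)
    rw [show ((↑(0 : Nat) : Nat) : Int) + 1 = (1 : Int) from by norm_num] at hinner
    have h2 := ih (s + 1) (by omega) (by omega)
    rw [show ((↑(s + 1) : Nat) : Int) + 1 = (↑s + 1 + 1 : Int) from by push_cast; ring] at h2
    rw [← h2]
    congr 1
    rw [FS0_FR pud M N s]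
    rw [← FRM_FS pud M N s]
    exact hinner

theorem solutionA_eq_cellP (m n : Int) (puddles : List (Int × Int))
    (hm : 1 ≤ m) (hn : 1 ≤ n)
    (hp : ∀ p ∈ puddles, -(m + 1) ≤ p.1 ∧ p.1 ≤ m ∧ -(n + 1) ≤ p.2 ∧ p.2 ≤ n) :
    solution m n puddles
    = cellP (puddles.map (fun p => (PySem.Int.mod p.1 (m + 1), PySem.Int.mod p.2 (n + 1))))
        n.toNat m.toNat := by
  obtain ⟨M, hM, rfl⟩ : ∃ M : Nat, 1 ≤ M ∧ m = ↑M := ⟨m.toNat, by omega, by omega⟩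
  obtain ⟨N, hN, rfl⟩ : ∃ N : Nat, 1 ≤ N ∧ n = ↑N := ⟨n.toNat, by omega, by omega⟩
  show PySem.List.pyGetD (PySem.List.pyGetD
      ((PySem.List.pyRange 1 ((↑N : Int) + 1) 1).foldl
        (fun mp i =>
          (PySem.List.pyRange 1 ((↑M : Int) + 1) 1).foldl
            (fun mp j =>
              if PySem.List.pyGetD (PySem.List.pyGetD mp i []) j 0 = -1 then mp
              else
                let mp1 :=
                  if PySem.List.pyGetD (PySem.List.pyGetD mp (i - 1) []) j 0 ≠ -1 then
                    PySem.List.pySetD mp i (PySem.List.pySetD (PySem.List.pyGetD mp i []) j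
                      (PySem.List.pyGetD (PySem.List.pyGetD mp i []) j 0 +
                       PySem.List.pyGetD (PySem.List.pyGetD mp (i - 1) []) j 0))
                  else mp
                let mp2 :=
                  if PySem.List.pyGetD (PySem.List.pyGetD mp1 i []) (j - 1) 0 ≠ -1 then
                    PySem.List.pySetD mp1 i (PySem.List.pySetD (PySem.List.pyGetD mp1 i []) j
                      (PySem.List.pyGetD (PySem.List.pyGetD mp1 i []) j 0 +
                       PySem.List.pyGetD (PySem.List.pyGetD mp1 i []) (j - 1) 0))
                  else mp1
                PySem.List.pySetD mp2 i (PySem.List.pySetD (PySem.List.pyGetD mp2 i []) j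
                  (PySem.Int.mod (PySem.List.pyGetD (PySem.List.pyGetD mp2 i []) j 0) 1000000007)))
            mp)
        (puddles.foldl (fun mp p =>
            PySem.List.pySetD mp p.2
              (PySem.List.pySetD (PySem.List.pyGetD mp p.2 []) p.1 (-1)))
          (PySem.List.pySetD
            ((PySem.List.pyRange 0 ((↑N : Int) + 1) 1).map (fun _ => List.replicate (M + 1) (0 : Int)))
            (((1 : Nat) : Int))
            (PySem.List.pySetD
              (PySem.List.pyGetD
                ((PySem.List.pyRange 0 ((↑N : Int) + 1) 1).map (fun _ => List.replicate (M + 1) (0 : Int)))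
                (((1 : Nat) : Int)) [])
              (((1 : Nat) : Int)) 1))))
      ((↑N : Nat) : Int) []) ((↑M : Nat) : Int) 0
    = cellP (puddles.map (fun p =>
        (PySem.Int.mod p.1 ((↑M : Int) + 1), PySem.Int.mod p.2 ((↑N : Int) + 1))))
        ((↑N : Int)).toNat ((↑M : Int)).toNat
  rw [initA M N, startA M N hM hN]
  rw [puddleA M N puddles _ hp]
  rw [show tabF (fun i j => if ((↑j : Int), (↑i : Int)) ∈
          puddles.map (fun p => (PySem.Int.mod p.1 ((↑M : Int) + 1), PySem.Int.mod p.2 ((↑N : Int) + 1)))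
        then -1
        else if i = 1 ∧ j = 1 then (1 : Int) else 0) M N
      = tabF (FS (puddles.map (fun p =>
          (PySem.Int.mod p.1 ((↑M : Int) + 1), PySem.Int.mod p.2 ((↑N : Int) + 1)))) 0) M N from
    tabF_congr _ _ _ _ (fun i _ j _ => by
      unfold FS
      rw [if_neg (show ¬ (1 ≤ i ∧ i ≤ 0) from by omega)]
      rfl)]
  have houter := outerA (puddles.map (fun p =>
      (PySem.Int.mod p.1 ((↑M : Int) + 1), PySem.Int.mod p.2 ((↑N : Int) + 1)))) M N 0 (by omega)
  rw [show ((↑(0 : Nat) : Nat) : Int) + 1 = (1 : Int) from by norm_num] at houter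
  rw [houter]
  rw [tabF_get _ _ _ N M le_rfl le_rfl]
  unfold FS
  rw [if_pos ⟨hN, le_rfl⟩]
  simp

theorem mod_small (a L : Int) (hL : 0 < L) (h1 : -L ≤ a) (h2 : a < L) :
    PySem.Int.mod a L = if 0 ≤ a then a else a + L := by
  split_ifs with h0
  · rw [PySem.Int.mod_eq_emod_of_pos hL, Int.emod_eq_of_lt h0 h2]
  · rw [PySem.Int.mod_eq_emod_of_pos hL]
    have h3 := Int.add_mul_emod_self_left (a := a) (b := L) (c := 1)
    rw [mul_one] at h3
    rw [← h3, Int.emod_eq_of_lt (by omega) (by omega)]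

theorem D_iff_mem (m n : Int) (puddles : List (Int × Int))
    (hm : 1 ≤ m) (hn : 1 ≤ n)
    (hp : ∀ p ∈ puddles, -(m + 1) ≤ p.1 ∧ p.1 ≤ m ∧ -(n + 1) ≤ p.2 ∧ p.2 ≤ n) :
    D_solution m n puddles ↔
    (m, n) ∈ puddles.map (fun p => (PySem.Int.mod p.1 (m + 1), PySem.Int.mod p.2 (n + 1))) := by
  rw [List.mem_map]
  unfold D_solution
  constructor
  · rintro ⟨p, hpmem, h1, h2⟩
    refine ⟨p, hpmem, ?_⟩
    obtain ⟨b1, b2, b3, b4⟩ := hp p hpmem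
    rw [mod_small p.1 (m + 1) (by omega) (by omega) (by omega)]
    rw [mod_small p.2 (n + 1) (by omega) (by omega) (by omega)]
    rw [Prod.mk.injEq]
    constructor <;> split_ifs <;> omega
  · rintro ⟨p, hpmem, heq⟩
    refine ⟨p, hpmem, ?_⟩
    obtain ⟨b1, b2, b3, b4⟩ := hp p hpmem
    rw [mod_small p.1 (m + 1) (by omega) (by omega) (by omega)] at heq
    rw [mod_small p.2 (n + 1) (by omega) (by omega) (by omega)] at heq
    rw [Prod.mk.injEq] at heq
    obtain ⟨e1, e2⟩ := heq
    constructor <;> split_ifs at e1 e2 <;> omega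

-- ===== B-side machinery =====

-- the exact (un-reduced) obstructed path count, same recursion shape as Vc
def gExact (pud : List (Int × Int)) : Nat → Nat → Int
  | x, y =>
    if (↑x, ↑y) ∈ pud then 0
    else if x = 0 ∨ y = 0 then 0
    else if x = 1 ∧ y = 1 then 1
    else gExact pud x (y - 1) + gExact pud (x - 1) y
  termination_by x y => x + y
  decreasing_by all_goals omega

theorem Vc_eq_mod_g (pud : List (Int × Int)) : ∀ x y : Nat,
    Vc pud x y = PySem.Int.mod (gExact pud x y) 1000000007 := by
  have key : ∀ s x y : Nat, x + y ≤ s →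
      Vc pud x y = PySem.Int.mod (gExact pud x y) 1000000007 := by
    intro s
    induction s with
    | zero =>
      intro x y hxy
      have hx : x = 0 := by omega
      subst hx
      rw [Vc_x_zero, gExact]
      split_ifs with h1 h2 h3
      · rw [PySem.Int.mod_eq_emod_of_pos (by norm_num)]; norm_num
      · rw [PySem.Int.mod_eq_emod_of_pos (by norm_num)]; norm_num
      · omega
      · omega
    | succ s ih =>
      intro x y hxy
      rw [Vc, gExact]
      by_cases hmem : ((↑x : Int), (↑y : Int)) ∈ pud
      · rw [if_pos hmem, if_pos hmem, PySem.Int.mod_eq_emod_of_pos (by norm_num)]; norm_num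
      · rw [if_neg hmem, if_neg hmem]
        by_cases hb : x = 0 ∨ y = 0
        · rw [if_pos hb, if_pos hb, PySem.Int.mod_eq_emod_of_pos (by norm_num)]; norm_num
        · rw [if_neg hb, if_neg hb]
          by_cases hs : x = 1 ∧ y = 1
          · rw [if_pos hs, if_pos hs, PySem.Int.mod_eq_emod_of_pos (by norm_num)]
            rw [Int.emod_eq_of_lt (by norm_num) (by norm_num)]
          · rw [if_neg hs, if_neg hs, ih x (y - 1) (by omega), ih (x - 1) y (by omega)]
            rw [PySem.Int.mod_eq_emod_of_pos (by norm_num),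
                PySem.Int.mod_eq_emod_of_pos (by norm_num),
                PySem.Int.mod_eq_emod_of_pos (by norm_num)]
            rw [← Int.add_emod, PySem.Int.mod_eq_emod_of_pos (by norm_num)]
  exact fun x y => key (x + y) x y le_rfl

-- free monotone path count from a to b
def Nfree (a b : Int × Int) : Int :=
  if a.1 ≤ b.1 ∧ a.2 ≤ b.2 then
    ((((b.1 - a.1) + (b.2 - a.2)).toNat.choose (b.1 - a.1).toNat : Nat) : Int)
  else 0

theorem paths_loop (E : Nat) (D : Nat) : ∀ t : Nat, t ≤ D →
    (PySem.List.pyRange (↑t + 1) (↑D + 1) 1).foldl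
      (fun r i => PySem.Int.floordiv (r * (↑E + i)) i) (((E + t).choose t : Nat) : Int)
    = (((E + D).choose D : Nat) : Int) := by
  intro t ht
  induction hk : D - t generalizing t with
  | zero =>
    have : t = D := by omega
    subst this
    rw [PySem.List.pyRange_one_eq_nil (a := (↑t : Int) + 1) (b := (↑t : Int) + 1) le_rfl]
    rfl
  | succ k ih =>
    have htD : t < D := by omega
    rw [PySem.List.pyRange_one_cons (a := (↑t : Int) + 1) (b := (↑D : Int) + 1) (by push_cast; omega),
        List.foldl_cons]
    have hstep : PySem.Int.floordiv ((((E + t).choose t : Nat) : Int) * (↑E + ((↑t : Int) + 1))) ((↑t : Int) + 1)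
        = (((E + (t + 1)).choose (t + 1) : Nat) : Int) := by
      have hcast : (((E + t).choose t : Nat) : Int) * (↑E + ((↑t : Int) + 1))
          = (((E + t).choose t * (E + t + 1) : Nat) : Int) := by push_cast; ring
      rw [hcast, show ((↑t : Int) + 1) = ((t + 1 : Nat) : Int) from by push_cast; ring,
          PySem.Int.floordiv_natCast]
      congr 1
      have hid := Nat.succ_mul_choose_eq (E + t) t
      have hmul : (E + t).choose t * (E + t + 1) = (E + (t + 1)).choose (t + 1) * (t + 1) := by
        rw [mul_comm]
        simpa [Nat.succ_eq_add_one, ← Nat.add_assoc] using hid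
      rw [hmul, Nat.mul_div_cancel _ (by omega)]
    have h2 := ih (t + 1) (by omega) (by omega)
    rw [show ((↑(t + 1) : Nat) : Int) + 1 = (↑t : Int) + 1 + 1 from by push_cast; ring] at h2
    rw [← h2]
    congr 1

theorem pyPaths_eq (dx dy : Int) :
    pyPaths dx dy = if 0 ≤ dx ∧ 0 ≤ dy then (((dx + dy).toNat.choose dx.toNat : Nat) : Int) else 0 := by
  unfold pyPaths
  by_cases h : dx < 0 ∨ dy < 0
  · rw [if_pos h, if_neg (by omega)]
  · rw [if_neg h, if_pos (by omega)]
    obtain ⟨D, rfl⟩ : ∃ D : Nat, dx = ↑D := ⟨dx.toNat, by omega⟩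
    obtain ⟨E, rfl⟩ : ∃ E : Nat, dy = ↑E := ⟨dy.toNat, by omega⟩
    have h0 := paths_loop E D 0 (by omega)
    rw [show ((↑(0 : Nat) : Int) + 1) = (1 : Int) from by norm_num,
        show (((E + 0).choose 0 : Nat) : Int) = 1 from by norm_num] at h0
    rw [h0]
    congr 1
    rw [show ((↑D : Int) + (↑E : Int)).toNat = D + E from by omega,
        show ((↑D : Int)).toNat = D from by omega, Nat.add_comm E D]

theorem pyPaths_eq_Nfree (a b : Int × Int) :
    pyPaths (b.1 - a.1) (b.2 - a.2) = Nfree a b := by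
  rw [pyPaths_eq]
  unfold Nfree
  split_ifs with h1 h2 h2 <;> first | rfl | omega

-- the inclusion-exclusion weights, built step by step exactly as B builds them
def fStep (acc : List ((Int × Int) × Int)) (p : Int × Int) : List ((Int × Int) × Int) :=
  acc ++ [(p, Nfree (1, 1) p - (acc.map (fun qu => qu.2 * Nfree qu.1 p)).sum)]

def annotF (acc : List ((Int × Int) × Int)) (pts : List (Int × Int)) : List ((Int × Int) × Int) :=
  pts.foldl fStep acc

def Gv (A : List ((Int × Int) × Int)) (c : Int × Int) : Int :=
  Nfree (1, 1) c - (A.map (fun qu => qu.2 * Nfree qu.1 c)).sum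

theorem foldl_sub {α : Type} (h : α → Int) : ∀ (l : List α) (init : Int),
    l.foldl (fun w x => w - h x) init = init - (l.map h).sum := by
  intro l
  induction l with
  | nil => intro init; simp
  | cons a l ih =>
    intro init
    rw [List.foldl_cons, ih, List.map_cons, List.sum_cons]
    ring

theorem zip_append_one {α β : Type} (x : α) (w : β) : ∀ (v : List β) (xs : List α),
    xs[v.length]? = some x →
    xs.zip (v ++ [w]) = xs.zip v ++ [(x, w)] := by
  intro v
  induction v with
  | nil =>
    intro xs hx
    cases xs with
    | nil => simp at hx
    | cons y ys =>
      simp only [List.length_nil, List.getElem?_cons_zero, Option.some.injEq] at hx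
      subst hx
      simp [List.zip]
  | cons a v' ih =>
    intro xs hx
    cases xs with
    | nil => simp at hx
    | cons y ys =>
      simp only [List.length_cons, List.getElem?_cons_succ] at hx
      simp only [List.cons_append, List.zip_cons_cons, ih ys hx]

theorem annotF_map_fst (pts : List (Int × Int)) : ∀ acc,
    (annotF acc pts).map Prod.fst = acc.map Prod.fst ++ pts := by
  induction pts with
  | nil => intro acc; simp [annotF]
  | cons p l ih =>
    intro acc
    show (annotF (fStep acc p) l).map Prod.fst = acc.map Prod.fst ++ (p :: l)
    rw [ih]
    simp [fStep]

theorem annotF_prefix (pts : List (Int × Int)) : ∀ acc,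
    ∃ rest, annotF acc pts = acc ++ rest ∧ ∀ e ∈ rest, e.1 ∈ pts := by
  induction pts with
  | nil => intro acc; exact ⟨[], by simp [annotF], by simp⟩
  | cons p l ih =>
    intro acc
    obtain ⟨rest, h1, h2⟩ := ih (fStep acc p)
    refine ⟨(p, Nfree (1, 1) p - (acc.map (fun qu => qu.2 * Nfree qu.1 p)).sum) :: rest, ?_, ?_⟩
    · show annotF (fStep acc p) l = _
      rw [h1]
      simp [fStep]
    · intro e he
      rcases List.mem_cons.mp he with h | h
      · subst h; exact List.mem_cons_self
      · exact List.mem_cons_of_mem _ (h2 e h)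

theorem sum_map_split (A : List ((Int × Int) × Int)) (F f g : (Int × Int) × Int → Int)
    (h : ∀ e ∈ A, F e = f e + g e) :
    (A.map F).sum = (A.map f).sum + (A.map g).sum := by
  induction A with
  | nil => simp
  | cons a l ih =>
    simp only [List.map_cons, List.sum_cons, h a List.mem_cons_self,
      ih (fun e he => h e (List.mem_cons_of_mem _ he))]
    ring

-- delta-Pascal recurrence for Nfree
theorem Nfree_rec (q c : Int × Int) (h1 : 1 ≤ c.1) (h2 : 1 ≤ c.2) :
    Nfree q c = Nfree q (c.1 - 1, c.2) + Nfree q (c.1, c.2 - 1) + (if q = c then 1 else 0) := by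
  obtain ⟨a, b⟩ := q
  obtain ⟨x, y⟩ := c
  simp only at h1 h2
  unfold Nfree
  dsimp only
  simp only [Prod.mk.injEq]
  by_cases hq : a ≤ x ∧ b ≤ y
  · obtain ⟨ha, hb⟩ := hq
    by_cases hax : a = x
    · by_cases hby : b = y
      · subst hax; subst hby
        rw [if_pos ⟨le_rfl, le_rfl⟩, if_neg (by omega), if_neg (by omega),
            if_pos ⟨rfl, rfl⟩]
        norm_num
      · rw [if_pos ⟨le_of_eq hax, hb⟩, if_neg (by omega), if_pos ⟨le_of_eq hax, by omega⟩,
            if_neg (fun h => hby h.2)]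
        rw [show ((x - a) + (y - b)).toNat = (y - b).toNat from by omega,
            show (x - a).toNat = 0 from by omega,
            show ((x - a) + ((y - 1) - b)).toNat = ((y - 1) - b).toNat from by omega]
        simp [Nat.choose_zero_right]
    · have hax' : a < x := lt_of_le_of_ne ha fun h => hax h
      by_cases hby : b = y
      · subst hby
        rw [if_pos ⟨ha, le_rfl⟩, if_pos ⟨by omega, le_rfl⟩, if_neg (by omega),
            if_neg (fun h => hax h.1)]
        rw [show ((x - a) + (b - b)).toNat = (x - a).toNat from by omega,
            show (((x - 1) - a) + (b - b)).toNat = ((x - 1) - a).toNat from by omega,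
            show ((x - 1) - a).toNat = (x - a).toNat - 1 from by omega]
        rw [Nat.choose_self, Nat.choose_self]
        norm_num
      · have hby' : b < y := lt_of_le_of_ne hb fun h => hby h
        rw [if_pos ⟨ha, hb⟩, if_pos ⟨by omega, hb⟩, if_pos ⟨ha, by omega⟩,
            if_neg (fun h => hax h.1)]
        rw [show ((x - a) + (y - b)).toNat = ((x - a - 1).toNat + (y - b - 1).toNat + 1) + 1 from by omega,
            show (x - a).toNat = (x - a - 1).toNat + 1 from by omega,
            show (((x - 1) - a) + (y - b)).toNat = (x - a - 1).toNat + (y - b - 1).toNat + 1 from by omega,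
            show ((x - 1) - a).toNat = (x - a - 1).toNat from by omega,
            show ((x - a) + ((y - 1) - b)).toNat = (x - a - 1).toNat + (y - b - 1).toNat + 1 from by omega]
        rw [Nat.choose_succ_succ]
        push_cast
        ring
  · rw [if_neg hq, if_neg (fun h => hq ⟨by omega, h.2⟩), if_neg (fun h => hq ⟨h.1, by omega⟩),
        if_neg (fun h => hq ⟨le_of_eq h.1, le_of_eq h.2⟩)]
    norm_num

theorem Nfree_self (c : Int × Int) : Nfree c c = 1 := by
  unfold Nfree
  rw [if_pos ⟨le_rfl, le_rfl⟩]
  simp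

-- entries of the weight list: coordinates stay nonnegative and boundary entries weigh 0
theorem annot_entries (pts : List (Int × Int)) : ∀ acc,
    (∀ p ∈ pts, 0 ≤ p.1 ∧ 0 ≤ p.2) →
    (∀ e ∈ acc, (0 ≤ e.1.1 ∧ 0 ≤ e.1.2) ∧ ((e.1.1 ≤ 0 ∨ e.1.2 ≤ 0) → e.2 = 0)) →
    ∀ e ∈ annotF acc pts, (0 ≤ e.1.1 ∧ 0 ≤ e.1.2) ∧ ((e.1.1 ≤ 0 ∨ e.1.2 ≤ 0) → e.2 = 0) := by
  induction pts with
  | nil =>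
    intro acc h1 h2 e he
    exact h2 e he
  | cons p l ih =>
    intro acc h1 h2 e he
    refine ih _ (fun q hq => h1 q (List.mem_cons_of_mem _ hq)) ?_ e he
    intro e' he'
    simp only [fStep] at he'
    rcases List.mem_append.mp he' with h | h
    · exact h2 e' h
    · have he'' : e' = (p, Nfree (1, 1) p - (acc.map (fun qu => qu.2 * Nfree qu.1 p)).sum) := by
        simpa using h
      subst he''
      have hp0 := h1 p List.mem_cons_self
      refine ⟨hp0, ?_⟩
      intro hbd
      simp only at hbd ⊢
      have hNf : Nfree (1, 1) p = 0 := by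
        unfold Nfree
        rw [if_neg (by omega)]
      have hsum : (acc.map (fun qu => qu.2 * Nfree qu.1 p)).sum = 0 := by
        apply List.sum_eq_zero
        intro z hz
        obtain ⟨qu, hqu, rfl⟩ := List.mem_map.mp hz
        by_cases hN : qu.1.1 ≤ p.1 ∧ qu.1.2 ≤ p.2
        · have hq0 := h2 qu hqu
          rw [hq0.2 (by omega), zero_mul]
        · have hz0 : Nfree qu.1 p = 0 := by unfold Nfree; rw [if_neg hN]
          rw [hz0, mul_zero]
      rw [hNf, hsum]
      norm_num

-- G vanishes at every puddle (pts listed in row-major order)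
theorem G_at_mem (pts : List (Int × Int))
    (hpw : pts.Pairwise (fun a b : Int × Int => a.2 < b.2 ∨ (a.2 = b.2 ∧ a.1 < b.1)))
    (c : Int × Int) (hc : c ∈ pts) :
    Gv (annotF [] pts) c = 0 := by
  obtain ⟨l1, l2, rfl⟩ := List.append_of_mem hc
  have hsub : (c :: l2).Sublist (l1 ++ c :: l2) := List.sublist_append_right _ _
  have hpw2 := hpw.sublist hsub
  rw [List.pairwise_cons] at hpw2
  have hsplit : annotF [] (l1 ++ c :: l2) = annotF (fStep (annotF [] l1) c) l2 := by
    unfold annotF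
    rw [List.foldl_append, List.foldl_cons]
  obtain ⟨rest, hR, hRmem⟩ := annotF_prefix l2 (fStep (annotF [] l1) c)
  unfold Gv
  rw [hsplit, hR]
  simp only [fStep]
  simp only [List.map_append, List.sum_append, List.map_cons, List.map_nil,
    List.sum_cons, List.sum_nil]
  rw [Nfree_self]
  have hrest : (rest.map (fun qu => qu.2 * Nfree qu.1 c)).sum = 0 := by
    apply List.sum_eq_zero
    intro z hz
    obtain ⟨e, he, rfl⟩ := List.mem_map.mp hz
    have hq : e.1 ∈ l2 := hRmem e he
    have hN : Nfree e.1 c = 0 := by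
      unfold Nfree
      rw [if_neg]
      intro hcon
      have hlex := hpw2.1 e.1 hq
      obtain ⟨hc1, hc2⟩ := hcon
      rcases hlex with h | ⟨h1, h2⟩ <;> omega
    rw [hN, mul_zero]
  rw [hrest]
  ring

-- G vanishes on the boundary
theorem G_at_boundary (pts : List (Int × Int)) (hnn : ∀ p ∈ pts, 0 ≤ p.1 ∧ 0 ≤ p.2)
    (c : Int × Int) (hc : c.1 ≤ 0 ∨ c.2 ≤ 0) (hc0 : 0 ≤ c.1 ∧ 0 ≤ c.2) :
    Gv (annotF [] pts) c = 0 := by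
  unfold Gv
  have hNf : Nfree (1, 1) c = 0 := by
    unfold Nfree
    rw [if_neg (by omega)]
  have hsum : ((annotF [] pts).map (fun qu => qu.2 * Nfree qu.1 c)).sum = 0 := by
    apply List.sum_eq_zero
    intro z hz
    obtain ⟨e, he, rfl⟩ := List.mem_map.mp hz
    have hinv := annot_entries pts [] hnn (by simp) e he
    by_cases hN : e.1.1 ≤ c.1 ∧ e.1.2 ≤ c.2
    · rw [hinv.2 (by omega), zero_mul]
    · have hz0 : Nfree e.1 c = 0 := by unfold Nfree; rw [if_neg hN]
      rw [hz0, mul_zero]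
  rw [hNf, hsum]
  norm_num

-- G satisfies the DP recurrence away from the puddles
theorem G_rec (pts : List (Int × Int)) (c : Int × Int)
    (h1 : 1 ≤ c.1) (h2 : 1 ≤ c.2) (hc : c ∉ pts) :
    Gv (annotF [] pts) c
    = Gv (annotF [] pts) (c.1 - 1, c.2) + Gv (annotF [] pts) (c.1, c.2 - 1)
      + (if c = (1, 1) then 1 else 0) := by
  unfold Gv
  have hA := annotF_map_fst pts []
  simp only [List.map_nil, List.nil_append] at hA
  have hterm : ∀ e ∈ annotF [] pts,
      (fun qu : (Int × Int) × Int => qu.2 * Nfree qu.1 c) e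
      = (fun qu : (Int × Int) × Int =>
          qu.2 * Nfree qu.1 (c.1 - 1, c.2) + qu.2 * Nfree qu.1 (c.1, c.2 - 1)) e := by
    intro e he
    have hfst : e.1 ∈ pts := by
      rw [← hA]
      exact List.mem_map_of_mem he
    have hne : e.1 ≠ c := fun h => hc (h ▸ hfst)
    simp only
    rw [Nfree_rec e.1 c h1 h2, if_neg hne]
    ring
  rw [sum_map_split (annotF [] pts) _
      (fun qu : (Int × Int) × Int => qu.2 * Nfree qu.1 (c.1 - 1, c.2))
      (fun qu : (Int × Int) × Int => qu.2 * Nfree qu.1 (c.1, c.2 - 1)) hterm]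
  rw [Nfree_rec (1, 1) c h1 h2]
  rw [show (if ((1, 1) : Int × Int) = c then (1 : Int) else 0)
      = (if c = (1, 1) then (1 : Int) else 0) from if_congr eq_comm rfl rfl]
  ring

theorem g_eq_G (pts : List (Int × Int))
    (hpw : pts.Pairwise (fun a b : Int × Int => a.2 < b.2 ∨ (a.2 = b.2 ∧ a.1 < b.1)))
    (hnn : ∀ p ∈ pts, 0 ≤ p.1 ∧ 0 ≤ p.2) :
    ∀ x y : Nat, gExact pts x y = Gv (annotF [] pts) (↑x, ↑y) := by
  have key : ∀ s x y : Nat, x + y ≤ s → gExact pts x y = Gv (annotF [] pts) (↑x, ↑y) := by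
    intro s
    induction s with
    | zero =>
      intro x y hxy
      have hx : x = 0 := by omega
      subst hx
      rw [gExact]
      by_cases hmem : ((↑(0 : Nat) : Int), (↑y : Int)) ∈ pts
      · rw [if_pos hmem]
        exact (G_at_mem pts hpw _ hmem).symm
      · rw [if_neg hmem, if_pos (Or.inl rfl)]
        exact (G_at_boundary pts hnn _ (by simp) (by simp)).symm
    | succ s ih =>
      intro x y hxy
      rw [gExact]
      by_cases hmem : ((↑x : Int), (↑y : Int)) ∈ pts
      · rw [if_pos hmem]
        exact (G_at_mem pts hpw _ hmem).symm
      · rw [if_neg hmem]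
        by_cases hb : x = 0 ∨ y = 0
        · rw [if_pos hb]
          refine (G_at_boundary pts hnn ((↑x : Int), (↑y : Int)) ?_ ?_).symm
          · simp only
            omega
          · simp only
            omega
        · rw [if_neg hb]
          have hcpts : ((↑x : Int), (↑y : Int)) ∉ pts := hmem
          have hrec := G_rec pts ((↑x : Int), (↑y : Int)) (by simp only; omega)
            (by simp only; omega) hcpts
          simp only at hrec
          rw [show (((↑x : Int) - 1, (↑y : Int)) : Int × Int)
                = (((↑(x - 1) : Int)), (↑y : Int)) from by
                rw [Prod.mk.injEq]; exact ⟨by omega, rfl⟩,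
              show (((↑x : Int), (↑y : Int) - 1) : Int × Int)
                = ((↑x : Int), ((↑(y - 1) : Int))) from by
                rw [Prod.mk.injEq]; exact ⟨rfl, by omega⟩] at hrec
          by_cases hs : x = 1 ∧ y = 1
          · rw [if_pos hs]
            obtain ⟨rfl, rfl⟩ := hs
            rw [hrec]
            rw [G_at_boundary pts hnn _ (by norm_num) (by norm_num),
                G_at_boundary pts hnn _ (by norm_num) (by norm_num)]
            rw [if_pos (by norm_num)]
            norm_num
          · rw [if_neg hs, ih x (y - 1) (by omega), ih (x - 1) y (by omega), hrec]
            rw [if_neg (by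
              intro hcon
              rw [Prod.mk.injEq] at hcon
              omega)]
            ring
  exact fun x y => key (x + y) x y le_rfl

theorem ways_build (pts : List (Int × Int)) : ∀ (todo done : List (Int × Int)) (acc : List Int),
    pts = done ++ todo → acc.length = done.length → pts.zip acc = annotF [] done →
    pts.zip (todo.foldl (fun ways p =>
        ways ++ [(pts.zip ways).foldl
          (fun w qu => w - qu.2 * pyPaths (p.1 - qu.1.1) (p.2 - qu.1.2))
          (pyPaths (p.1 - 1) (p.2 - 1))]) acc) = annotF [] pts := by
  intro todo
  induction todo with
  | nil =>
    intro done acc h1 h2 h3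
    rw [List.foldl_nil]
    rw [List.append_nil] at h1
    subst h1
    exact h3
  | cons p rest ih =>
    intro done acc h1 h2 h3
    rw [List.foldl_cons]
    refine ih (done ++ [p]) _ (by rw [h1]; simp) (by simp [h2]) ?_
    have hget : pts[acc.length]? = some p := by
      rw [h1, h2]
      rw [List.getElem?_append_right (le_refl done.length), Nat.sub_self]
      rfl
    rw [zip_append_one p _ acc pts hget]
    have hR : annotF [] (done ++ [p]) = fStep (annotF [] done) p := by
      unfold annotF
      rw [List.foldl_append, List.foldl_cons, List.foldl_nil]
    rw [hR]
    simp only [fStep]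
    rw [h3]
    have hmapc : (annotF [] done).map
          (fun qu : (Int × Int) × Int => qu.2 * pyPaths (p.1 - qu.1.1) (p.2 - qu.1.2))
        = (annotF [] done).map (fun qu : (Int × Int) × Int => qu.2 * Nfree qu.1 p) :=
      List.map_congr_left (fun qu _ => by
        show qu.2 * pyPaths (p.1 - qu.1.1) (p.2 - qu.1.2) = qu.2 * Nfree qu.1 p
        rw [pyPaths_eq_Nfree qu.1 p])
    rw [foldl_sub (fun qu : (Int × Int) × Int => qu.2 * pyPaths (p.1 - qu.1.1) (p.2 - qu.1.2)),
        hmapc,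
        show pyPaths (p.1 - 1) (p.2 - 1) = Nfree (1, 1) p from pyPaths_eq_Nfree (1, 1) p]

theorem Vc_congr (p1 p2 : List (Int × Int))
    (h : ∀ a b : Nat, 1 ≤ a → 1 ≤ b →
      (((↑a : Int), (↑b : Int)) ∈ p1 ↔ ((↑a : Int), (↑b : Int)) ∈ p2)) :
    ∀ x y : Nat, Vc p1 x y = Vc p2 x y := by
  have key : ∀ s x y : Nat, x + y ≤ s → Vc p1 x y = Vc p2 x y := by
    intro s
    induction s with
    | zero =>
      intro x y hxy
      have hx : x = 0 := by omega
      subst hx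
      rw [Vc_x_zero, Vc_x_zero]
    | succ s ih =>
      intro x y hxy
      by_cases hb : x = 0 ∨ y = 0
      · rcases hb with hb | hb <;> subst hb
        · rw [Vc_x_zero, Vc_x_zero]
        · rw [Vc_y_zero, Vc_y_zero]
      · conv_lhs => rw [Vc]
        conv_rhs => rw [Vc]
        rw [if_congr (h x y (by omega) (by omega)) rfl rfl]
        rw [ih x (y - 1) (by omega), ih (x - 1) y (by omega)]
  exact fun x y => key (x + y) x y le_rfl

theorem flatMap_pairwise {α β : Type} (R : β → β → Prop) (l : List α) (f : α → List β)
    (S : α → α → Prop)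
    (hl : l.Pairwise S)
    (hwithin : ∀ a ∈ l, (f a).Pairwise R)
    (hacross : ∀ a b : α, S a b → ∀ x ∈ f a, ∀ y ∈ f b, R x y) :
    (l.flatMap f).Pairwise R := by
  induction l with
  | nil => simp
  | cons a l ih =>
    rw [List.flatMap_cons, List.pairwise_append]
    rw [List.pairwise_cons] at hl
    refine ⟨hwithin a List.mem_cons_self,
      ih hl.2 (fun b hb => hwithin b (List.mem_cons_of_mem _ hb)), ?_⟩
    intro x hx y hy
    obtain ⟨b, hb, hyb⟩ := List.mem_flatMap.mp hy
    exact hacross a b (hl.1 b hb) x hx y hyb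

-- the grid contents after the blocking writes, and the row-major blocked-cell list
def gridF (NL : List (Int × Int)) (i j : Nat) : Bool :=
  if ((↑j : Int), (↑i : Int)) ∈ NL then true else false

def ptsOf (M N : Nat) (NL : List (Int × Int)) : List (Int × Int) :=
  (PySem.List.pyRange 1 ((↑N : Int) + 1) 1).flatMap (fun y =>
    ((PySem.List.pyRange 1 ((↑M : Int) + 1) 1).filter (fun x =>
      PySem.List.pyGetD (PySem.List.pyGetD (tabB (gridF NL) M N) y []) x false)).map
      (fun x => (x, y)))

theorem mem_ptsOf (M N : Nat) (NL : List (Int × Int)) (p : Int × Int) :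
    p ∈ ptsOf M N NL ↔ ∃ a b : Nat, p = ((↑a : Int), (↑b : Int)) ∧ 1 ≤ a ∧ a ≤ M ∧
      1 ≤ b ∧ b ≤ N ∧ ((↑a : Int), (↑b : Int)) ∈ NL := by
  unfold ptsOf
  rw [List.mem_flatMap]
  constructor
  · rintro ⟨y, hy, hp⟩
    rw [PySem.List.pyRange_one] at hy
    obtain ⟨k, hk, rfl⟩ := List.mem_map.mp hy
    rw [List.mem_range] at hk
    obtain ⟨x, hx, rfl⟩ := List.mem_map.mp hp
    rw [List.mem_filter] at hx
    obtain ⟨hx1, hx2⟩ := hx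
    rw [PySem.List.pyRange_one] at hx1
    obtain ⟨j, hj, rfl⟩ := List.mem_map.mp hx1
    rw [List.mem_range] at hj
    have hcast1 : ((1 : Int) + (↑k : Int)) = ((↑(k + 1) : Int)) := by push_cast; ring
    have hcast2 : ((1 : Int) + (↑j : Int)) = ((↑(j + 1) : Int)) := by push_cast; ring
    rw [hcast1, hcast2] at hx2 ⊢
    rw [tabB_get (gridF NL) M N (k + 1) (j + 1) (by omega) (by omega)] at hx2
    unfold gridF at hx2
    split_ifs at hx2 with hmem
    exact ⟨j + 1, k + 1, rfl, by omega, by omega, by omega, by omega, hmem⟩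
  · rintro ⟨a, b, rfl, ha1, ha2, hb1, hb2, hmem⟩
    refine ⟨(↑b : Int), ?_, ?_⟩
    · rw [PySem.List.pyRange_one]
      exact List.mem_map.mpr ⟨b - 1, List.mem_range.mpr (by omega), by push_cast; omega⟩
    · refine List.mem_map.mpr ⟨(↑a : Int), ?_, rfl⟩
      rw [List.mem_filter]
      constructor
      · rw [PySem.List.pyRange_one]
        exact List.mem_map.mpr ⟨a - 1, List.mem_range.mpr (by omega), by push_cast; omega⟩
      · rw [tabB_get (gridF NL) M N b a (by omega) (by omega)]
        unfold gridF
        rw [if_pos hmem]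

theorem pairwise_ptsOf (M N : Nat) (NL : List (Int × Int)) :
    (ptsOf M N NL).Pairwise
      (fun a b : Int × Int => a.2 < b.2 ∨ (a.2 = b.2 ∧ a.1 < b.1)) := by
  unfold ptsOf
  apply flatMap_pairwise _ _ _ (fun y1 y2 : Int => y1 < y2)
  · rw [PySem.List.pyRange_one, List.pairwise_map]
    exact List.pairwise_lt_range.imp (by intro a b hab; omega)
  · intro y hy
    rw [List.pairwise_map]
    apply List.Pairwise.filter
    rw [PySem.List.pyRange_one, List.pairwise_map]
    refine List.pairwise_lt_range.imp ?_
    intro a b hab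
    right
    exact ⟨rfl, by omega⟩
  · intro y1 y2 hS p1 hp1 p2 hp2
    obtain ⟨x1,
      hmem1, rfl⟩ := List.mem_map.mp hp1
    obtain ⟨x2, hmem2, rfl⟩ := List.mem_map.mp hp2
    left
    exact hS

theorem bPts_eq (M N : Nat) (hM : 1 ≤ M) (hN : 1 ≤ N) (puddles : List (Int × Int))
    (hp : ∀ p ∈ puddles, -((↑M : Int) + 1) ≤ p.1 ∧ p.1 ≤ ↑M ∧
      -((↑N : Int) + 1) ≤ p.2 ∧ p.2 ≤ ↑N) :
    bPts (↑M) (↑N) puddles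
    = ptsOf M N (puddles.map (fun p =>
        (PySem.Int.mod p.1 ((↑M : Int) + 1), PySem.Int.mod p.2 ((↑N : Int) + 1)))) := by
  unfold bPts bBlocked
  rw [show (((↑M : Int)) + 1).toNat = M + 1 from by omega]
  rw [initB M N, puddleB M N puddles _ hp]
  rfl

theorem alt_eq_Vc (m n : Int) (puddles : List (Int × Int))
    (hm : 1 ≤ m) (hn : 1 ≤ n)
    (hp : ∀ p ∈ puddles, -(m + 1) ≤ p.1 ∧ p.1 ≤ m ∧ -(n + 1) ≤ p.2 ∧ p.2 ≤ n) :
    solution_alt m n puddles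
    = Vc (puddles.map (fun p => (PySem.Int.mod p.1 (m + 1), PySem.Int.mod p.2 (n + 1))))
        m.toNat n.toNat := by
  obtain ⟨M, hM, rfl⟩ : ∃ M : Nat, 1 ≤ M ∧ m = ↑M := ⟨m.toNat, by omega, by omega⟩
  obtain ⟨N, hN, rfl⟩ : ∃ N : Nat, 1 ≤ N ∧ n = ↑N := ⟨n.toNat, by omega, by omega⟩
  have hdef : solution_alt (↑M) (↑N) puddles
      = PySem.Int.mod (((bPts (↑M) (↑N) puddles).zip
          ((bPts (↑M) (↑N) puddles).foldl (fun ways p =>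
            ways ++ [((bPts (↑M) (↑N) puddles).zip ways).foldl
              (fun w qu => w - qu.2 * pyPaths (p.1 - qu.1.1) (p.2 - qu.1.2))
              (pyPaths (p.1 - 1) (p.2 - 1))]) ([] : List Int))).foldl
          (fun t qu => t - qu.2 * pyPaths ((↑M : Int) - qu.1.1) ((↑N : Int) - qu.1.2))
          (pyPaths ((↑M : Int) - 1) ((↑N : Int) - 1))) 1000000007 := rfl
  rw [hdef, bPts_eq M N hM hN puddles hp]
  set NL := puddles.map (fun p =>
    (PySem.Int.mod p.1 ((↑M : Int) + 1), PySem.Int.mod p.2 ((↑N : Int) + 1))) with hNLdef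
  set P := ptsOf M N NL with hPdef
  have hnn : ∀ p ∈ P, 0 ≤ p.1 ∧ 0 ≤ p.2 := by
    intro p hp'
    rw [hPdef] at hp'
    obtain ⟨a, b, rfl, -, -, -, -, -⟩ := (mem_ptsOf M N _ p).mp hp'
    exact ⟨by positivity, by positivity⟩
  rw [ways_build P P [] [] (by simp) rfl (by simp [annotF])]
  rw [foldl_sub (fun qu : (Int × Int) × Int =>
      qu.2 * pyPaths ((↑M : Int) - qu.1.1) ((↑N : Int) - qu.1.2))]
  have hmapc : (annotF [] P).map
        (fun qu : (Int × Int) × Int => qu.2 * pyPaths ((↑M : Int) - qu.1.1) ((↑N : Int) - qu.1.2))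
      = (annotF [] P).map
        (fun qu : (Int × Int) × Int => qu.2 * Nfree qu.1 ((↑M : Int), (↑N : Int))) :=
    List.map_congr_left (fun qu _ => by
      show qu.2 * pyPaths ((↑M : Int) - qu.1.1) ((↑N : Int) - qu.1.2)
        = qu.2 * Nfree qu.1 ((↑M : Int), (↑N : Int))
      rw [pyPaths_eq_Nfree qu.1 ((↑M : Int), (↑N : Int))])
  rw [hmapc,
      show pyPaths ((↑M : Int) - 1) ((↑N : Int) - 1)
        = Nfree (1, 1) ((↑M : Int), (↑N : Int)) from
        pyPaths_eq_Nfree (1, 1) ((↑M : Int), (↑N : Int))]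
  have hGv : Nfree (1, 1) ((↑M : Int), (↑N : Int))
      - ((annotF [] P).map
          (fun qu => qu.2 * Nfree qu.1 ((↑M : Int), (↑N : Int)))).sum
      = Gv (annotF [] P) ((↑M : Int), (↑N : Int)) := rfl
  rw [hGv,
      show (((↑M : Int), (↑N : Int)) : Int × Int)
        = ((↑((↑M : Int).toNat) : Int), (↑((↑N : Int).toNat) : Int)) from by
        rw [Prod.mk.injEq]; omega,
      ← g_eq_G P (hPdef ▸ pairwise_ptsOf M N NL) hnn ((↑M : Int)).toNat ((↑N : Int)).toNat,
      ← Vc_eq_mod_g]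
  apply Vc_congr
  intro a b ha hb
  rw [hPdef, mem_ptsOf M N _ ((↑a : Int), (↑b : Int))]
  constructor
  · rintro ⟨a', b', heq, -, -, -, -, hmem⟩
    rw [Prod.mk.injEq] at heq
    obtain ⟨e1, e2⟩ := heq
    rw [show a = a' from by omega, show b = b' from by omega]
    exact hmem
  · intro hmem
    refine ⟨a, b, rfl, ha, ?_, hb, ?_, hmem⟩
    · obtain ⟨p, -, heq⟩ := List.mem_map.mp hmem
      rw [Prod.mk.injEq] at heq
      have := PySem.Int.mod_lt p.1 (b := (↑M : Int) + 1) (by omega)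
      omega
    · obtain ⟨p, -, heq⟩ := List.mem_map.mp hmem
      rw [Prod.mk.injEq] at heq
      have := PySem.Int.mod_lt p.2 (b := (↑N : Int) + 1) (by omega)
      omega

-- ===== VERDICT (by name: the statement is the Claim_ definition above) =====
theorem solution_spec : Claim_unchanged_solution := by
  intro m n puddles _ hpre hd
  obtain ⟨hm, hn, hp⟩ := hpre
  rw [solutionA_eq_cellP m n puddles hm hn hp]
  rw [cellP_of_not_mem _ _ _ (by
        rw [show ((↑m.toNat : Int), (↑n.toNat : Int)) = ((m, n) : Int × Int) from by
          rw [Prod.mk.injEq]; omega]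
        exact fun hmem => hd ((D_iff_mem m n puddles hm hn hp).mpr hmem))]
  exact (alt_eq_Vc m n puddles hm hn hp).symm

theorem solution_changed : Claim_changed_solution := by
  unfold Claim_changed_solution; decide

theorem solution_tight : Claim_exact_solution := by
  intro m n puddles _ hpre hd
  obtain ⟨hm, hn, hp⟩ := hpre
  rw [solutionA_eq_cellP m n puddles hm hn hp]
  rw [cellP_of_mem _ _ _ (by
        rw [show ((↑m.toNat : Int), (↑n.toNat : Int)) = ((m, n) : Int × Int) from by
          rw [Prod.mk.injEq]; omega]
        exact (D_iff_mem m n puddles hm hn hp).mp hd)]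
  rw [alt_eq_Vc m n puddles hm hn hp]
  have := Vc_nonneg (puddles.map (fun p =>
    (PySem.Int.mod p.1 (m + 1), PySem.Int.mod p.2 (n + 1)))) m.toNat n.toNat
  omega
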